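-- pv_equiv track=rewrite | github.com/HimanshuMukane/games | temp.py | decode_from_string
-- ===== SOURCE A (Python) =====
-- def decode_numbers(seq):
--     result = []
--     for num in seq:
--         if num == 100:  # space
--             result.append(" ")
--         elif isinstance(num, int):  # normal number
--             # A -> 0, B -> 1, etc., so letter = chr(num + 65)
--             if 0 <= num <= 25:
--                 result.append(chr(num + ord('A')))
--             else:
--                 result.append("?")  # unknown / out of range
--         elif isinstance(num, str):  # if it's a punctuation like "." or ","
--             result.append(num)
--     return "".join(result)
--
-- def decode_from_string(encrypted_string):
--     """Decode from a comma-separated string like '14,13,100,19,7,4'"""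
--     parts = encrypted_string.split(',')
--     sequence = []
--     for part in parts:
--         part = part.strip()
--         if part == '100':
--             sequence.append(100)
--         elif part.isdigit():
--             sequence.append(int(part))
--         else:
--             # It's a punctuation mark
--             sequence.append(part)
--     return decode_numbers(sequence)
-- ===== SOURCE B (Python) =====
-- def _decode_token(token):
--     """Decode one raw (unstripped) token to its character/string."""
--     t = token.strip()
--     if t.isdigit():
--         n = int(t)
--         if n == 100:
--             return " "
--         return chr(n + 65) if 0 <= n <= 25 else "?"
--     return t
--
-- def decode_from_string(encrypted_string):
--     """Decode from a comma-separated string like '14,13,100,19,7,4'"""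
--     out = []
--     token = ""
--     for ch in encrypted_string:
--         if ch == ',':
--             out.append(_decode_token(token))
--             token = ""
--         else:
--             token += ch
--     out.append(_decode_token(token))
--     return "".join(out)
-- ===== Notes on version B (the rewrite author's own statement) =====
-- stated objective: alternative
-- what changed: Replaces A's comma-split plus two staged list-building passes (a typed intermediate list, then a join-decode pass) with a single character-level scan that accumulates the current token and flushes its decoded value at each separator, decoding numerically (digit test and int conversion first, with the space code handled inside the numeric branch) instead of A's string-compare special case.
import Mathlib
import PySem

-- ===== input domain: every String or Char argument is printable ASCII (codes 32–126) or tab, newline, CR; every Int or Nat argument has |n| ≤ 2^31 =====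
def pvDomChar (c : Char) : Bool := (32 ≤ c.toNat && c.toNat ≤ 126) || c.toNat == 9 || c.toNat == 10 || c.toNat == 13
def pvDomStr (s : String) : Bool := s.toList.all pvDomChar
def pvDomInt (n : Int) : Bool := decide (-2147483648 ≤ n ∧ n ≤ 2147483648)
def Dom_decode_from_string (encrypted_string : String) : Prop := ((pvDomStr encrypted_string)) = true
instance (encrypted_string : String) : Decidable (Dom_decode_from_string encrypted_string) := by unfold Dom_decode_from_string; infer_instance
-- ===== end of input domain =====

-- B replaces A's split(',') + two staged list-building passes with a single character-level
-- scan that flushes each decoded token at a comma (objective: alternative decomposition).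

-- ===== PORT A =====
-- port of decode_numbers: the mixed int/str Python list becomes Sum Int String
def decode_numbers (seq : List (Sum Int String)) : String :=
  PySem.Str.join "" (seq.foldl (fun result num =>
    match num with
    | Sum.inl n =>
        if n = 100 then result ++ [" "]
        else if 0 ≤ n ∧ n ≤ 25 then result ++ [String.ofList [Char.ofNat (n + 65).toNat]]
        else result ++ ["?"]
    | Sum.inr s => result ++ [s]) [])

def decode_from_string (encrypted_string : String) : String :=
  let parts := (PySem.Str.split? encrypted_string ",").getD []
  let sequence := parts.foldl (fun seq part =>
    let p := PySem.Str.strip part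
    if p = "100" then seq ++ [Sum.inl (100 : Int)]
    else if PySem.Str.strIsdigit p then
      seq ++ [Sum.inl ((PySem.Int.ofStr? p).getD 0)]   -- int(p): isdigit guarantees it parses
    else seq ++ [Sum.inr p]) []
  decode_numbers sequence

-- ===== PORT B =====
-- _decode_token(token): the accumulated token is a List Char (Python builds it char by char)
def pvDecodeToken (token : List Char) : String :=
  let t := PySem.Chars.strip token
  if PySem.Chars.strIsdigit t then
    let n := (PySem.Int.ofChars? t).getD 0             -- int(t): isdigit guarantees it parses
    if n = 100 then " "
    else if 0 ≤ n ∧ n ≤ 25 then String.ofList [Char.ofNat (n + 65).toNat]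
    else "?"
  else String.ofList t

def decode_from_string_alt (encrypted_string : String) : String :=
  let st := encrypted_string.toList.foldl
    (fun (st : List String × List Char) ch =>
      if ch = ',' then (st.1 ++ [pvDecodeToken st.2], [])
      else (st.1, st.2 ++ [ch]))
    ([], [])
  PySem.Str.join "" (st.1 ++ [pvDecodeToken st.2])

-- ===== PRECONDITION & SPEC =====
def Spec_decode_from_string (encrypted_string : String) (out : String) : Prop := out = decode_from_string_alt encrypted_string
instance (encrypted_string : String) (out : String) : Decidable (Spec_decode_from_string encrypted_string out) := by unfold Spec_decode_from_string; infer_instance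

-- ===== CLAIM (what is proved, stated in full; the proofs are below) =====
def Claim_equal_decode_from_string : Prop := ∀ (encrypted_string : String), Dom_decode_from_string encrypted_string → Spec_decode_from_string encrypted_string (decode_from_string encrypted_string)

-- ===== LEMMAS AND PROOFS =====

-- pure structural comma-split (proof-side characterisation of both programs' token lists)
def splitComma : List Char → List (List Char)
  | [] => [[]]
  | c :: rest =>
      match splitComma rest with
      | t :: ts => if c = ',' then [] :: t :: ts else (c :: t) :: ts
      | [] => []      -- unreachable: splitComma is never []

theorem splitComma_ne_nil (l : List Char) : splitComma l ≠ [] := by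
  cases l with
  | nil => simp [splitComma]
  | cons c rest =>
      have := splitComma_ne_nil rest
      simp only [splitComma]
      match h : splitComma rest with
      | [] => exact absurd h this
      | t :: ts => split_ifs <;> simp

-- prepend onto the first piece
def consHead (x : List Char) : List (List Char) → List (List Char)
  | [] => []
  | t :: ts => (x ++ t) :: ts

theorem splitOn_go_comma (fuel : Nat) (l cur : List Char) (acc : List (List Char))
    (h : l.length < fuel) :
    PySem.Chars.splitOn.go [','] fuel l cur acc
      = acc.reverse ++ consHead cur.reverse (splitComma l) := by
  induction fuel generalizing l cur acc with
  | zero => omega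
  | succ fuel ih =>
      cases l with
      | nil => simp [PySem.Chars.splitOn.go, splitComma, consHead]
      | cons c rest =>
          by_cases hc : c = ','
          · subst hc
            have hpre : [','].isPrefixOf (',' :: rest) = true := by simp [List.isPrefixOf]
            rw [PySem.Chars.splitOn.go]
            simp only [hpre, if_true, List.length_cons, List.length_nil, List.drop_succ_cons, List.drop_zero]
            rw [ih rest [] (cur.reverse :: acc) (by simpa using Nat.lt_of_succ_lt_succ h)]
            have hne := splitComma_ne_nil rest
            simp only [splitComma]
            match hsp : splitComma rest with
            | [] => exact absurd hsp hne
            | t :: ts => simp [consHead]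
          · have hpre : [','].isPrefixOf (c :: rest) = false := by
              simp [List.isPrefixOf]
              intro h'; exact hc h'.symm
            rw [PySem.Chars.splitOn.go]
            simp only [hpre, Bool.false_eq_true, if_false]
            rw [ih rest (c :: cur) acc (by simpa using Nat.lt_of_succ_lt_succ h)]
            have hne := splitComma_ne_nil rest
            simp only [splitComma]
            match hsp : splitComma rest with
            | [] => exact absurd hsp hne
            | t :: ts => simp [consHead, hc]

theorem splitOn_comma (l : List Char) :
    PySem.Chars.splitOn l [','] = splitComma l := by
  unfold PySem.Chars.splitOn
  rw [splitOn_go_comma (l.length + 1) l [] [] (by omega)]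
  have hne := splitComma_ne_nil l
  match hsp : splitComma l with
  | [] => exact absurd hsp hne
  | t :: ts => simp [consHead]

-- A's first stage, per (already stripped) token
def tokA (p : String) : Sum Int String :=
  if p = "100" then Sum.inl (100 : Int)
  else if PySem.Str.strIsdigit p then Sum.inl ((PySem.Int.ofStr? p).getD 0)
  else Sum.inr p

-- A's second stage, per element
def tokB (num : Sum Int String) : String :=
  match num with
  | Sum.inl n =>
      if n = 100 then " "
      else if 0 ≤ n ∧ n ≤ 25 then String.ofList [Char.ofNat (n + 65).toNat]
      else "?"
  | Sum.inr s => s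

-- per-token agreement: A's two stages on the token-as-String = B's decoder on the token's chars
theorem tok_eq (cs : List Char) :
    tokB (tokA (PySem.Str.strip (String.ofList cs))) = pvDecodeToken cs := by
  unfold tokA tokB pvDecodeToken
  have hstrip : PySem.Str.strip (String.ofList cs) = String.ofList (PySem.Chars.strip cs) := by
    simp [PySem.Str.strip]
  rw [hstrip]
  by_cases h100 : PySem.Chars.strip cs = ['1', '0', '0']
  · rw [h100]; decide
  · have hne : String.ofList (PySem.Chars.strip cs) ≠ "100" := by
      intro h
      exact h100 (by simpa using congrArg String.toList h)
    simp only [hne, if_false]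
    by_cases hd : PySem.Chars.strIsdigit (PySem.Chars.strip cs)
    · simp [PySem.Str.strIsdigit, PySem.Int.ofStr?, hd]
    · simp [PySem.Str.strIsdigit, hd]

theorem decode_numbers_map (seq : List (Sum Int String)) :
    decode_numbers seq = PySem.Str.join "" (seq.map tokB) := by
  unfold decode_numbers
  congr 1
  have : (fun (result : List String) (num : Sum Int String) =>
      match num with
      | Sum.inl n =>
          if n = 100 then result ++ [" "]
          else if 0 ≤ n ∧ n ≤ 25 then result ++ [String.ofList [Char.ofNat (n + 65).toNat]]
          else result ++ ["?"]
      | Sum.inr s => result ++ [s]) = (fun result num => result ++ [tokB num]) := by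
    funext result num
    cases num with
    | inl n => simp only [tokB]; split_ifs <;> rfl
    | inr s => rfl
  rw [this, PySem.List.foldl_append_singleton_eq_map]
  simp

-- consHead with an empty prefix is the identity
theorem consHead_nil_left (ps : List (List Char)) : consHead [] ps = ps := by
  cases ps <;> simp [consHead]

-- B's scan: the foldl over characters, followed by the final flush, yields the decoded pieces
theorem scan_eq (l : List Char) (out : List String) (tok : List Char) :
    (l.foldl (fun (st : List String × List Char) ch =>
        if ch = ',' then (st.1 ++ [pvDecodeToken st.2], [])
        else (st.1, st.2 ++ [ch])) (out, tok)).1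
      ++ [pvDecodeToken (l.foldl (fun (st : List String × List Char) ch =>
        if ch = ',' then (st.1 ++ [pvDecodeToken st.2], [])
        else (st.1, st.2 ++ [ch])) (out, tok)).2]
      = out ++ (consHead tok (splitComma l)).map pvDecodeToken := by
  induction l generalizing out tok with
  | nil => simp [splitComma, consHead]
  | cons c rest ih =>
      by_cases hc : c = ','
      · subst hc
        simp only [List.foldl_cons, if_true]
        rw [ih]
        have hne := splitComma_ne_nil rest
        simp only [splitComma, consHead_nil_left]
        match hsp : splitComma rest with
        | [] => exact absurd hsp hne
        | t :: ts => simp [consHead]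
      · simp only [List.foldl_cons, hc, if_false]
        rw [ih]
        have hne := splitComma_ne_nil rest
        simp only [splitComma]
        match hsp : splitComma rest with
        | [] => exact absurd hsp hne
        | t :: ts => simp [consHead, hc]

-- ===== VERDICT (by name: the statement is the Claim_ definition above) =====
theorem decode_from_string_spec : Claim_equal_decode_from_string := by
  intro s _
  show decode_from_string s = decode_from_string_alt s
  have hsplit : (PySem.Str.split? s ",").getD []
      = (splitComma s.toList).map String.ofList := by
    simp [PySem.Str.split?, PySem.Chars.split?, splitOn_comma]
  have hA : decode_from_string s
      = PySem.Str.join "" ((splitComma s.toList).map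
          (fun cs => tokB (tokA (PySem.Str.strip (String.ofList cs))))) := by
    show decode_numbers (((PySem.Str.split? s ",").getD []).foldl (fun seq part =>
        if PySem.Str.strip part = "100" then seq ++ [Sum.inl (100 : Int)]
        else if PySem.Str.strIsdigit (PySem.Str.strip part) then
          seq ++ [Sum.inl ((PySem.Int.ofStr? (PySem.Str.strip part)).getD 0)]
        else seq ++ [Sum.inr (PySem.Str.strip part)]) []) = _
    rw [hsplit]
    rw [show (fun (seq : List (Sum Int String)) (part : String) =>
        if PySem.Str.strip part = "100" then seq ++ [Sum.inl (100 : Int)]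
        else if PySem.Str.strIsdigit (PySem.Str.strip part) then
          seq ++ [Sum.inl ((PySem.Int.ofStr? (PySem.Str.strip part)).getD 0)]
        else seq ++ [Sum.inr (PySem.Str.strip part)])
      = (fun seq part => seq ++ [tokA (PySem.Str.strip part)]) from by
        funext seq part
        simp only [tokA]
        split_ifs <;> rfl]
    rw [PySem.List.foldl_append_singleton_eq_map, List.nil_append, decode_numbers_map]
    simp only [List.map_map]
    rfl
  have hB : decode_from_string_alt s
      = PySem.Str.join "" ((splitComma s.toList).map pvDecodeToken) := by
    show PySem.Str.join "" ((s.toList.foldl (fun (st : List String × List Char) ch =>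
        if ch = ',' then (st.1 ++ [pvDecodeToken st.2], [])
        else (st.1, st.2 ++ [ch])) ([], [])).1
      ++ [pvDecodeToken (s.toList.foldl (fun (st : List String × List Char) ch =>
        if ch = ',' then (st.1 ++ [pvDecodeToken st.2], [])
        else (st.1, st.2 ++ [ch])) ([], [])).2]) = _
    rw [scan_eq, consHead_nil_left, List.nil_append]
  rw [hA, hB]
  exact congrArg _ (List.map_congr_left (fun cs _ => tok_eq cs))
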